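-- pv_equiv track=rewrite | github.com/Venkat500/ISRL_MazeMapping_Solver | Physical_Maze_Code/Check_maze_skip.py | check_maze
-- ===== SOURCE A (Python) =====
-- def check_maze(matrix):
--     rows = len(matrix)
--     columns = len(matrix[0])
--
--     for i in range(rows):
--         for j in range(columns):
--             if matrix[i][j] == 0:
--                 # Check top
--                 if i > 0 and matrix[i-1][j] == -1:
--                     return True
--                 # Check bottom
--                 if i < rows-1 and matrix[i+1][j] == -1:
--                     return True
--                 # Check left
--                 if j > 0 and matrix[i][j-1] == -1:
--                     return True
--                 # Check right
--                 if j < columns-1 and matrix[i][j+1] == -1: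
--                     return True
--     return False
-- ===== SOURCE B (Python) =====
-- def check_maze(matrix):
--     rows = len(matrix)
--     columns = len(matrix[0])
--     # Pass 1: dilate the -1 mask -- collect every in-grid cell adjacent to a -1 cell.
--     frontier = set()
--     for i in range(rows):
--         for j in range(columns):
--             if matrix[i][j] == -1:
--                 if i > 0:
--                     frontier.add((i - 1, j))
--                 if i < rows - 1:
--                     frontier.add((i + 1, j))
--                 if j > 0:
--                     frontier.add((i, j - 1))
--                 if j < columns - 1:
--                     frontier.add((i, j + 1))
--     # Pass 2: intersect with the 0 cells.
--     for i in range(rows):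
--         for j in range(columns):
--             if matrix[i][j] == 0 and (i, j) in frontier:
--                 return True
--     return False
-- ===== Notes on version B (the rewrite author's own statement) =====
-- stated objective: alternative
-- what changed: B uses a two-stage mask-dilation algorithm: pass 1 builds a set of all grid cells adjacent to some -1 cell (dilating the -1 mask), pass 2 checks whether any 0 cell lies in that set, instead of A's single scan probing four neighbours from each 0 cell.
-- outside the precondition, e.g. on check_maze([[0, -1], [5]]): A returns True, B raises IndexError
import Mathlib
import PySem

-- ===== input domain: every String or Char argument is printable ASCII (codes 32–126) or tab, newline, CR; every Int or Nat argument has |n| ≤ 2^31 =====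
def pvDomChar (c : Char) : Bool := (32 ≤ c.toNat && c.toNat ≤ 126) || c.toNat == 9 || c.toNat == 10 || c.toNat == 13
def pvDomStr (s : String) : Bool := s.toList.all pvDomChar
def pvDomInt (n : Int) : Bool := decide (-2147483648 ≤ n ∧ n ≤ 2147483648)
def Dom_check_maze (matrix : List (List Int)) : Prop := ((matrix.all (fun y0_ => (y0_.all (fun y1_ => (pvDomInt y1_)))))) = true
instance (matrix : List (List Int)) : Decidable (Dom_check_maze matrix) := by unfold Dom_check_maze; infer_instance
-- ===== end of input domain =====

-- B replaces A's single scan probing four neighbours from each 0 cell by a two-stage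
-- mask-dilation algorithm: pass 1 collects into a set every in-grid cell adjacent to a
-- -1 cell, pass 2 tests whether any 0 cell lies in that set. (objective: alternative)

-- matrix[i][j], total form; under Pre_ every access the ports make is in range
def pvCell (matrix : List (List Int)) (i j : Int) : Int :=
  PySem.List.pyGetD (PySem.List.pyGetD matrix i []) j 0

-- ===== PORT A =====
def check_maze (matrix : List (List Int)) : Bool :=
  let rows : Int := matrix.length
  let columns : Int := ((PySem.List.pyGetD matrix 0 []).length : Int)
  (PySem.List.pyRange 0 rows 1).any (fun i =>
    (PySem.List.pyRange 0 columns 1).any (fun j =>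
      if pvCell matrix i j = 0 then
        -- Check top / bottom / left / right, in A's order
        (decide (i > 0) && decide (pvCell matrix (i-1) j = -1)) ||
        (decide (i < rows - 1) && decide (pvCell matrix (i+1) j = -1)) ||
        (decide (j > 0) && decide (pvCell matrix i (j-1) = -1)) ||
        (decide (j < columns - 1) && decide (pvCell matrix i (j+1) = -1))
      else false))

-- ===== PORT B =====
-- loop body of B's pass 1: if (i,j) holds -1, add its in-grid neighbours to the set
def pvMark (matrix : List (List Int)) (rows columns : Int)
    (s : PySem.Set (Int × Int)) (i j : Int) : PySem.Set (Int × Int) :=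
  if pvCell matrix i j = -1 then
    let s1 := if i > 0 then PySem.Set.add s (i-1, j) else s
    let s2 := if i < rows - 1 then PySem.Set.add s1 (i+1, j) else s1
    let s3 := if j > 0 then PySem.Set.add s2 (i, j-1) else s2
    if j < columns - 1 then PySem.Set.add s3 (i, j+1) else s3
  else s

def check_maze_alt (matrix : List (List Int)) : Bool :=
  let rows : Int := matrix.length
  let columns : Int := ((PySem.List.pyGetD matrix 0 []).length : Int)
  -- Pass 1: dilate the -1 mask into a set of cells adjacent to some -1 cell
  let frontier : PySem.Set (Int × Int) :=
    (PySem.List.pyRange 0 rows 1).foldl (fun s i =>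
      (PySem.List.pyRange 0 columns 1).foldl (fun s j =>
        pvMark matrix rows columns s i j) s) PySem.Set.empty
  -- Pass 2: intersect with the 0 cells
  (PySem.List.pyRange 0 rows 1).any (fun i =>
    (PySem.List.pyRange 0 columns 1).any (fun j =>
      decide (pvCell matrix i j = 0) && PySem.Set.contains frontier (i, j)))

-- ===== PRECONDITION & SPEC =====
-- Pre_ excludes the empty matrix and matrices having a row shorter than the first row:
-- there A (and B) in general raise IndexError; on a few such inputs A still happens to
-- return True before reaching the short row (see the cite), which Pre_ also excludes.
def Pre_check_maze (matrix : List (List Int)) : Prop :=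
  matrix ≠ [] ∧ ∀ row ∈ matrix, (matrix.headD []).length ≤ row.length
instance (matrix : List (List Int)) : Decidable (Pre_check_maze matrix) := by
  unfold Pre_check_maze; infer_instance

def pvWitness_check_maze : List (List Int) := [[0, 1], [-1, 2]]

def Spec_check_maze (matrix : List (List Int)) (out : Bool) : Prop := out = check_maze_alt matrix
instance (matrix : List (List Int)) (out : Bool) : Decidable (Spec_check_maze matrix out) := by unfold Spec_check_maze; infer_instance

-- ===== CLAIM (what is proved, stated in full; the proofs are below) =====
def Claim_equal_check_maze : Prop := ∀ (matrix : List (List Int)), Dom_check_maze matrix → Pre_check_maze matrix → Spec_check_maze matrix (check_maze matrix)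

-- ===== LEMMAS AND PROOFS =====

-- (i,j) is an in-grid neighbour of cell (a,b) of the rows×columns grid
def pvNbr (rows columns a b : Int) (p : Int × Int) : Prop :=
  (a > 0 ∧ p = (a-1, b)) ∨ (a < rows - 1 ∧ p = (a+1, b)) ∨
  (b > 0 ∧ p = (a, b-1)) ∨ (b < columns - 1 ∧ p = (a, b+1))

theorem pv_mem_pvMark (matrix : List (List Int)) (rows columns : Int)
    (s : PySem.Set (Int × Int)) (a b : Int) (p : Int × Int) :
    p ∈ pvMark matrix rows columns s a b ↔
      p ∈ s ∨ (pvCell matrix a b = -1 ∧ pvNbr rows columns a b p) := by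
  unfold pvMark pvNbr
  split_ifs <;> (try simp only [PySem.Set.mem_add]) <;> tauto

theorem pv_mem_foldl {α β : Type} (p : α) (f : List α → β → List α) (Q : β → Prop)
    (hf : ∀ s x, p ∈ f s x ↔ p ∈ s ∨ Q x) :
    ∀ (l : List β) (s : List α), p ∈ l.foldl f s ↔ p ∈ s ∨ ∃ x ∈ l, Q x := by
  intro l
  induction l with
  | nil => simp
  | cons x xs ih =>
    intro s
    simp only [List.foldl_cons, ih, hf, List.mem_cons]
    constructor
    · rintro ((h | h) | ⟨y, hy, hq⟩)
      · exact Or.inl h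
      · exact Or.inr ⟨x, Or.inl rfl, h⟩
      · exact Or.inr ⟨y, Or.inr hy, hq⟩
    · rintro (h | ⟨y, (rfl | hy), hq⟩)
      · exact Or.inl (Or.inl h)
      · exact Or.inl (Or.inr hq)
      · exact Or.inr ⟨y, hy, hq⟩

theorem pv_mem_frontier (matrix : List (List Int)) (rows columns : Int) (p : Int × Int) :
    p ∈ ((PySem.List.pyRange 0 rows 1).foldl (fun s i =>
          (PySem.List.pyRange 0 columns 1).foldl (fun s j =>
            pvMark matrix rows columns s i j) s) PySem.Set.empty) ↔
      ∃ a ∈ PySem.List.pyRange 0 rows 1, ∃ b ∈ PySem.List.pyRange 0 columns 1,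
        pvCell matrix a b = -1 ∧ pvNbr rows columns a b p := by
  have inner : ∀ (a : Int) (s : PySem.Set (Int × Int)),
      p ∈ (PySem.List.pyRange 0 columns 1).foldl
            (fun s j => pvMark matrix rows columns s a j) s ↔
        p ∈ s ∨ ∃ b ∈ PySem.List.pyRange 0 columns 1,
          pvCell matrix a b = -1 ∧ pvNbr rows columns a b p :=
    fun a s => pv_mem_foldl p _ _
      (fun s b => pv_mem_pvMark matrix rows columns s a b p) _ s
  have outer := pv_mem_foldl p
      (fun s i => (PySem.List.pyRange 0 columns 1).foldl
        (fun s j => pvMark matrix rows columns s i j) s)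
      (fun a => ∃ b ∈ PySem.List.pyRange 0 columns 1,
        pvCell matrix a b = -1 ∧ pvNbr rows columns a b p)
      (fun s a => inner a s) (PySem.List.pyRange 0 rows 1) PySem.Set.empty
  simpa [PySem.Set.empty] using outer

theorem pv_any_any_iff (xs ys : List Int) (p : Int → Int → Bool) :
    (xs.any (fun i => ys.any (fun j => p i j)) = true) ↔ ∃ i ∈ xs, ∃ j ∈ ys, p i j = true := by
  simp [List.any_eq_true]

theorem pv_ite_false (c : Prop) [Decidable c] (b : Bool) :
    ((if c then b else false) = true) ↔ c ∧ b = true := by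
  split <;> simp_all

-- ===== VERDICT (by name: the statement is the Claim_ definition above) =====
theorem check_maze_spec : Claim_equal_check_maze := by
  intro matrix _ _
  unfold Spec_check_maze check_maze check_maze_alt
  rw [Bool.eq_iff_iff]
  simp only [pv_any_any_iff, pv_ite_false, Bool.or_eq_true, Bool.and_eq_true,
    decide_eq_true_eq, PySem.Set.contains_iff, pv_mem_frontier,
    PySem.List.mem_pyRange_one]
  constructor
  · rintro ⟨i, hi, j, hj, h0, hdir⟩
    refine ⟨i, hi, j, hj, h0, ?_⟩
    rcases hdir with ((⟨hb, hv⟩ | ⟨hb, hv⟩) | ⟨hb, hv⟩) | ⟨hb, hv⟩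
    · -- top neighbour (i-1,j) is -1; (i,j) is its bottom neighbour
      refine ⟨i - 1, by omega, j, hj, hv, Or.inr (Or.inl ⟨by omega, ?_⟩)⟩
      simp
    · -- bottom neighbour (i+1,j) is -1; (i,j) is its top neighbour
      exact ⟨i + 1, by omega, j, hj, hv, Or.inl ⟨by omega, by simp⟩⟩
    · -- left neighbour (i,j-1) is -1; (i,j) is its right neighbour
      refine ⟨i, hi, j - 1, by omega, hv, Or.inr (Or.inr (Or.inr ⟨by omega, ?_⟩))⟩
      simp
    · -- right neighbour (i,j+1) is -1; (i,j) is its left neighbour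
      exact ⟨i, hi, j + 1, by omega, hv, Or.inr (Or.inr (Or.inl ⟨by omega, by simp⟩))⟩
  · rintro ⟨i, hi, j, hj, h0, a, ha, b, hb, hv, hn⟩
    refine ⟨i, hi, j, hj, h0, ?_⟩
    rcases hn with ⟨hc, hp⟩ | ⟨hc, hp⟩ | ⟨hc, hp⟩ | ⟨hc, hp⟩ <;>
      (simp only [Prod.ext_iff] at hp; obtain ⟨hp1, hp2⟩ := hp)
    · -- (i,j) = (a-1,b): bottom neighbour of (i,j) is the -1 cell (a,b)
      refine Or.inl (Or.inl (Or.inr ⟨by omega, ?_⟩))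
      have : i + 1 = a := by omega
      rw [this, hp2]; exact hv
    · -- (i,j) = (a+1,b): top neighbour
      refine Or.inl (Or.inl (Or.inl ⟨by omega, ?_⟩))
      have : i - 1 = a := by omega
      rw [this, hp2]; exact hv
    · -- (i,j) = (a,b-1): right neighbour
      refine Or.inr ⟨by omega, ?_⟩
      have : j + 1 = b := by omega
      rw [hp1, this]; exact hv
    · -- (i,j) = (a,b+1): left neighbour
      refine Or.inl (Or.inr ⟨by omega, ?_⟩)
      have : j - 1 = b := by omega
      rw [hp1, this]; exact hv
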